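-- pv_equiv track=rewrite | github.com/brycetolman54/CS312Notes | Codes/HW1.py | fabb
-- ===== SOURCE A (Python) =====
-- def fabb(n):
--     if n == 0 or n == 1 or n == 2:
--         return 1
--     else:
--         n1 = 1
--         n2 = 1
--         n3 = 1
--         n4 = 0
--     for i in range (n - 2):
--         n4 = n1 + n2 * n3
--         n1 = n2
--         n2 = n3
--         n3 = n4
--     return n4
-- ===== SOURCE B (Python) =====
-- def fabb(n):
--     memo = {}
--
--     def f(k):
--         if k < 0:
--             return 0
--         if k <= 2:
--             return 1
--         if k not in memo:
--             memo[k] = f(k - 3) + f(k - 2) * f(k - 1)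
--         return memo[k]
--
--     return f(n)
-- ===== Notes on version B (the rewrite author's own statement) =====
-- stated objective: alternative
-- what changed: Replaced the four-register iterative loop by a top-down memoized recursion on the recurrence f(n) = f(n-3) + f(n-2)*f(n-1) with base cases f(0..2) = 1 and f(k<0) = 0 (which is also what the empty loop yields).
import Mathlib
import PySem

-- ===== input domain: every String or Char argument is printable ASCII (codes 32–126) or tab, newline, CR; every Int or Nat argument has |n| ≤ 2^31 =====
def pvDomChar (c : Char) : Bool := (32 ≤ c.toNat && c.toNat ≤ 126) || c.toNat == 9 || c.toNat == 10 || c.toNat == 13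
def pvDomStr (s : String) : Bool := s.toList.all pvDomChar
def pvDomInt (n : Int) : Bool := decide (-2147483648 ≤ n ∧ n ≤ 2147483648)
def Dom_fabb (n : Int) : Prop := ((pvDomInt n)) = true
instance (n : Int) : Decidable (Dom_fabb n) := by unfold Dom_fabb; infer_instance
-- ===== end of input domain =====

-- B replaces A's four-register iterative loop by a top-down recursion of the same
-- recurrence (memoized in Python); same values on every int, no speed claim.

-- ===== PORT A =====
-- one iteration of A's loop body on the registers (n1, n2, n3, n4)
def pvStep (s : Int × Int × Int × Int) : Int × Int × Int × Int :=
  let n4 := s.1 + s.2.1 * s.2.2.1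
  (s.2.1, s.2.2.1, n4, n4)

def fabb (n : Int) : Int :=
  if n == 0 || n == 1 || n == 2 then 1
  else
    -- Python's `for i in range(n - 2)` ignores i and updates the registers in place
    let s := (PySem.List.pyRange 0 (n - 2) 1).foldl (fun s _ => pvStep s) (1, 1, 1, 0)
    s.2.2.2

-- ===== PORT B =====
-- port of Source B's inner recursion f (the memo dict only caches; it does not change the value)
def fabb_alt (n : Int) : Int :=
  if n < 0 then 0
  else if n ≤ 2 then 1
  else fabb_alt (n - 3) + fabb_alt (n - 2) * fabb_alt (n - 1)
termination_by n.toNat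
decreasing_by all_goals omega

-- ===== PRECONDITION & SPEC =====
def Spec_fabb (n : Int) (out : Int) : Prop := out = fabb_alt n
instance (n : Int) (out : Int) : Decidable (Spec_fabb n out) := by unfold Spec_fabb; infer_instance

-- ===== CLAIM (what is proved, stated in full; the proofs are below) =====
def Claim_equal_fabb : Prop := ∀ (n : Int), Dom_fabb n → Spec_fabb n (fabb n)

-- ===== LEMMAS AND PROOFS =====

theorem fabb_alt_neg {n : Int} (h : n < 0) : fabb_alt n = 0 := by
  rw [fabb_alt]; simp [h]

theorem fabb_alt_base {n : Int} (h0 : 0 ≤ n) (h2 : n ≤ 2) : fabb_alt n = 1 := by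
  rw [fabb_alt]; rw [if_neg (by omega), if_pos h2]

-- one unfolding of the recurrence at an argument ≥ 3
theorem fabb_alt_rec (k : Nat) :
    fabb_alt ((k : Int) + 3) = fabb_alt k + fabb_alt ((k : Int) + 1) * fabb_alt ((k : Int) + 2) := by
  rw [fabb_alt]
  have h1 : ¬ ((k : Int) + 3 < 0) := by omega
  have h2 : ¬ ((k : Int) + 3 ≤ 2) := by omega
  simp only [h1, h2, if_false]
  rw [show (k : Int) + 3 - 3 = (k : Int) by ring,
      show (k : Int) + 3 - 2 = (k : Int) + 1 by ring,
      show (k : Int) + 3 - 1 = (k : Int) + 2 by ring]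

-- a fold that ignores the list elements only depends on the length
theorem foldl_const {α β : Type} (g : β → β) (l : List α) (init : β) :
    l.foldl (fun s _ => g s) init = g^[l.length] init := by
  induction l generalizing init with
  | nil => rfl
  | cons a t ih => simp [List.foldl, ih, Function.iterate_succ_apply]

-- loop invariant: after k+1 iterations the registers hold (f(k+1), f(k+2), f(k+3), f(k+3))
theorem pvStep_iterate (k : Nat) :
    pvStep^[k + 1] (1, 1, 1, 0) =
      (fabb_alt ((k : Int) + 1), fabb_alt ((k : Int) + 2), fabb_alt ((k : Int) + 3), fabb_alt ((k : Int) + 3)) := by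
  induction k with
  | zero =>
    have h0 : fabb_alt 0 = 1 := fabb_alt_base (by omega) (by omega)
    have h1 : fabb_alt 1 = 1 := fabb_alt_base (by omega) (by omega)
    have h2 : fabb_alt 2 = 1 := fabb_alt_base (by omega) (by omega)
    have h3 : fabb_alt 3 = 2 := by
      have := fabb_alt_rec 0
      simp only [Nat.cast_zero, zero_add] at this
      rw [this, h0, h1, h2]; ring
    simp [pvStep, h1, h2, h3]
  | succ m ih =>
    rw [Function.iterate_succ_apply', ih]
    have hrec := fabb_alt_rec (m + 1)
    simp only [pvStep]
    push_cast at hrec ⊢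
    rw [show ((m : Int) + 1) + 3 = (m : Int) + 4 by ring,
        show ((m : Int) + 1) + 2 = (m : Int) + 3 by ring,
        show ((m : Int) + 1) + 1 = (m : Int) + 2 by ring] at hrec ⊢
    rw [hrec]

-- ===== VERDICT (by name: the statement is the Claim_ definition above) =====
theorem fabb_spec : Claim_equal_fabb := by
  intro n _
  unfold Spec_fabb fabb
  by_cases h012 : n = 0 ∨ n = 1 ∨ n = 2
  · have : (n == 0 || n == 1 || n == 2) = true := by
      rcases h012 with h | h | h <;> simp [h]
    rw [this, if_pos rfl]
    rcases h012 with h | h | h <;> subst h <;>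
      exact (fabb_alt_base (by omega) (by omega)).symm
  · have hb : (n == 0 || n == 1 || n == 2) = false := by
      simp only [Bool.or_eq_false_iff, beq_eq_false_iff_ne]
      exact ⟨⟨fun h => h012 (Or.inl h), fun h => h012 (Or.inr (Or.inl h))⟩,
        fun h => h012 (Or.inr (Or.inr h))⟩
    rw [hb, if_neg (by simp)]
    rw [foldl_const pvStep (PySem.List.pyRange 0 (n - 2) 1) (1, 1, 1, 0)]
    rw [PySem.List.length_pyRange_one]
    by_cases hn : n ≥ 3
    · obtain ⟨k, hk⟩ : ∃ k : Nat, (n - 2 - 0).toNat = k + 1 := ⟨(n - 3).toNat, by omega⟩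
      rw [hk, pvStep_iterate]
      have : (k : Int) + 3 = n := by omega
      rw [this]
    · -- n < 0 here (0,1,2 excluded above; n < 3): the loop runs zero times and n4 stays 0
      have hneg : n < 0 := by omega
      have : (n - 2 - 0).toNat = 0 := by omega
      rw [this]
      simp [Function.iterate_zero]
      exact (fabb_alt_neg hneg).symm
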